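-- pv_equiv track=rewrite | github.com/korotaS/four_russians_algorithm_python | main.py | make_count_matrix
-- ===== SOURCE A (Python) =====
-- from functools import reduce
--
-- def xor(a, b):
--     """
--     This method calculates xor between two binary numbers.
--     """
--     return int(bool(a) ^ bool(b))
--
-- def xor_array(arr):
--     """
--     This method calculates xor of an array of binary numbers.
--     """
--     return reduce(lambda a, b: xor(a, b), arr, 0)
--
-- def scalar_mult_mod_2(arr_a, arr_b):
--     """
--     This method calculates the scalar product of two vectors mod 2.
--     """
--     return xor_array([a * b for a, b in zip(arr_a, arr_b)])
--
-- def make_count_matrix(mat_a_split, mat_b_split):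
--     """
--     This method precomputes the matrix of all possible binary tuples from two input sequences,
--     as it is done in the Method of Four Russians (check README.md).
--     """
--     mat_a_unique = list(set([tuple(el) for row in mat_a_split for el in row]))
--     mat_b_unique = list(set([tuple(el) for row in mat_b_split for el in row]))
--
--     count_matrix = {}
--     for un_a in mat_a_unique:
--         for un_b in mat_b_unique:
--             count_matrix[(un_a, un_b)] = scalar_mult_mod_2(un_a, un_b)
--     return count_matrix
-- ===== SOURCE B (Python) =====
-- def _mask(t):
--     m = 0
--     for v in reversed(t):
--         m = 2 * m + (1 if v else 0)
--     return m
--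
-- def make_count_matrix(mat_a_split, mat_b_split):
--     ua = list(set(tuple(el) for row in mat_a_split for el in row))
--     ub = list(set(tuple(el) for row in mat_b_split for el in row))
--     pa = [(t, _mask(t)) for t in ua]
--     pb = [(t, _mask(t)) for t in ub]
--     return {(ta, tb): (ma & mb).bit_count() & 1
--             for ta, ma in pa for tb, mb in pb}
-- ===== Notes on version B (the rewrite author's own statement) =====
-- stated objective: faster
-- what changed: B packs each unique tuple once into an integer bitmask of its nonzero positions and computes each pair's parity as (mask_a & mask_b).bit_count() & 1, replacing A's per-pair product-list building and reduce/xor fold.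
import Mathlib
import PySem

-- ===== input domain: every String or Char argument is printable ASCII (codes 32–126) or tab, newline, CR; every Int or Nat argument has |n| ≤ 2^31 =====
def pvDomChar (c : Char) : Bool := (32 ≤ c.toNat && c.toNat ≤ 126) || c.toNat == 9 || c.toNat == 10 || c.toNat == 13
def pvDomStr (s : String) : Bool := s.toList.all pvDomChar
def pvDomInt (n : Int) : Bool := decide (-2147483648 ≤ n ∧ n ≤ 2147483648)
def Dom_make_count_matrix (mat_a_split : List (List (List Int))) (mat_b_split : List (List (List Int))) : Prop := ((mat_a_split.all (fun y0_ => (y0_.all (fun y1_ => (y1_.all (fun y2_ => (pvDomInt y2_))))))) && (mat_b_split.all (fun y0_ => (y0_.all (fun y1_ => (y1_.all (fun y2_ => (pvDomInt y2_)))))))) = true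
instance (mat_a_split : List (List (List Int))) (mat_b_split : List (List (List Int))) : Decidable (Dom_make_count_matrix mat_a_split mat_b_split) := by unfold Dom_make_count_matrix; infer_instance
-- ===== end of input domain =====

-- B replaces A's per-pair reduce/xor fold with per-tuple bitmasks and popcount parity
-- (a different computation of each entry; same dict of key-value pairs).

-- ===== PORT A =====
-- xor(a, b) = int(bool(a) ^ bool(b))
def pv_xor (a b : Int) : Int := if Bool.xor (decide (a ≠ 0)) (decide (b ≠ 0)) then 1 else 0

-- xor_array(arr) = reduce(lambda a, b: xor(a, b), arr, 0)
def pv_xor_array (arr : List Int) : Int := arr.foldl (fun a b => pv_xor a b) 0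

-- scalar_mult_mod_2(arr_a, arr_b)
def pv_scalar_mult_mod_2 (arr_a arr_b : List Int) : Int :=
  pv_xor_array ((arr_a.zip arr_b).map (fun p => p.1 * p.2))

def make_count_matrix (mat_a_split : List (List (List Int))) (mat_b_split : List (List (List Int))) : List (List Int × List Int × Int) :=
  let mat_a_unique := PySem.Set.ofList (mat_a_split.flatMap (fun row => row))
  let mat_b_unique := PySem.Set.ofList (mat_b_split.flatMap (fun row => row))
  let count_matrix : PySem.Dict (List Int × List Int) Int :=
    mat_a_unique.foldl (fun d un_a =>
      mat_b_unique.foldl (fun d un_b =>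
        d.insert (un_a, un_b) (pv_scalar_mult_mod_2 un_a un_b)) d) PySem.Dict.empty
  -- the dict (tuple-pair key, value) flattened to the declared triple type
  count_matrix.items.map (fun p => (p.1.1, p.1.2, p.2))

-- ===== PORT B =====
-- _mask(t): m = 0; for v in reversed(t): m = 2*m + (1 if v else 0)
def pv_mask (t : List Int) : Int :=
  t.reverse.foldl (fun m v => 2 * m + (if v ≠ 0 then 1 else 0)) 0

def make_count_matrix_alt (mat_a_split : List (List (List Int))) (mat_b_split : List (List (List Int))) : List (List Int × List Int × Int) :=
  let ua := PySem.Set.ofList (mat_a_split.flatMap (fun row => row))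
  let ub := PySem.Set.ofList (mat_b_split.flatMap (fun row => row))
  let pa := ua.map (fun t => (t, pv_mask t))
  let pb := ub.map (fun t => (t, pv_mask t))
  let d : PySem.Dict (List Int × List Int) Int :=
    pa.foldl (fun d q =>
      pb.foldl (fun d r =>
        d.insert (q.1, r.1)
          (PySem.Int.band ((PySem.Int.bitCount (PySem.Int.band q.2 r.2) : Nat) : Int) 1)) d) PySem.Dict.empty
  d.items.map (fun p => (p.1.1, p.1.2, p.2))

-- ===== PRECONDITION & SPEC =====
def Spec_make_count_matrix (mat_a_split : List (List (List Int))) (mat_b_split : List (List (List Int))) (out : List (List Int × List Int × Int)) : Prop := out = make_count_matrix_alt mat_a_split mat_b_split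
instance (mat_a_split : List (List (List Int))) (mat_b_split : List (List (List Int))) (out : List (List Int × List Int × Int)) : Decidable (Spec_make_count_matrix mat_a_split mat_b_split out) := by unfold Spec_make_count_matrix; infer_instance

-- ===== CLAIM (what is proved, stated in full; the proofs are below) =====
def Claim_equal_make_count_matrix : Prop := ∀ (mat_a_split : List (List (List Int))) (mat_b_split : List (List (List Int))), Dom_make_count_matrix mat_a_split mat_b_split → Spec_make_count_matrix mat_a_split mat_b_split (make_count_matrix mat_a_split mat_b_split)

-- ===== LEMMAS AND PROOFS =====

-- the Nat value of a mask, structurally on the list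
def maskN (t : List Int) : Nat :=
  t.foldr (fun v m => 2 * m + (if v ≠ 0 then 1 else 0)) 0

theorem pv_mask_eq (t : List Int) : pv_mask t = ((maskN t : Nat) : Int) := by
  unfold pv_mask
  rw [List.foldl_reverse]
  induction t with
  | nil => rfl
  | cons x xs ih =>
      simp only [List.foldr_cons, maskN] at *
      rw [ih]
      by_cases hx : x ≠ 0 <;> simp [hx]

theorem maskN_cons (x : Int) (xs : List Int) :
    maskN (x :: xs) = Nat.bit (decide (x ≠ 0)) (maskN xs) := by
  simp only [maskN, List.foldr_cons, Nat.bit]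
  by_cases hx : x ≠ 0 <;> simp [hx]

theorem bitCount_bit (c : Bool) (k : Nat) :
    PySem.Int.bitCount ((Nat.bit c k : Nat) : Int) = c.toNat + PySem.Int.bitCount ((k : Nat) : Int) := by
  cases c
  · by_cases hk : k = 0
    · simp [hk, Nat.bit]
    · have hv : Nat.bit false k = 2 * k := by simp [Nat.bit]
      rw [hv, PySem.Int.bitCount_natCast (show 0 < 2 * k by omega)]
      have h1 : 2 * k % 2 = 0 := by omega
      have h2 : 2 * k / 2 = k := by omega
      rw [h1, h2]
      simp
  · have hv : Nat.bit true k = 2 * k + 1 := by simp [Nat.bit]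
    rw [hv, PySem.Int.bitCount_natCast (show 0 < 2 * k + 1 by omega)]
    have h1 : (2 * k + 1) % 2 = 1 := by omega
    have h2 : (2 * k + 1) / 2 = k := by omega
    rw [h1, h2]
    simp

-- popcount of the AND of two masks counts the zip positions where both entries are nonzero
theorem popcount_land_eq (a : List Int) : ∀ b : List Int,
    PySem.Int.bitCount (((maskN a &&& maskN b : Nat) : Nat) : Int)
      = (a.zip b).countP (fun p => decide (p.1 * p.2 ≠ 0)) := by
  induction a with
  | nil => intro b; simp [maskN]
  | cons x xs ih =>
      intro b
      cases b with
      | nil => simp [maskN]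
      | cons y ys =>
          have hl : Nat.bit (decide (x ≠ 0)) (maskN xs) &&& Nat.bit (decide (y ≠ 0)) (maskN ys)
              = Nat.bit (decide (x ≠ 0) && decide (y ≠ 0)) (maskN xs &&& maskN ys) := by
            show Nat.bitwise and _ _ = _
            exact Nat.bitwise_bit rfl _ _ _ _
          rw [maskN_cons, maskN_cons, hl, bitCount_bit, ih ys]
          simp only [List.zip_cons_cons, List.countP_cons]
          have : (decide (x ≠ 0) && decide (y ≠ 0)) = decide (x * y ≠ 0) := by
            by_cases hx : x = 0 <;> by_cases hy : y = 0 <;> simp [hx, hy]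
          rw [this]
          by_cases hxy : x * y ≠ 0 <;> first | (simp [hxy]; omega) | simp [hxy]

-- A's xor fold computes the parity of the count of nonzero entries
theorem xorfold_eq (l : List Int) : ∀ i : Nat, i ≤ 1 →
    l.foldl (fun a b => pv_xor a b) ((i : Nat) : Int)
      = (((i + l.countP (fun v => decide (v ≠ 0))) % 2 : Nat) : Int) := by
  induction l with
  | nil => intro i hi; interval_cases i <;> simp
  | cons v t ih =>
      intro i hi
      simp only [List.foldl_cons, List.countP_cons]
      by_cases hv : v ≠ 0
      · interval_cases i
        · have h1 : pv_xor ((0 : Nat) : Int) v = ((1 : Nat) : Int) := by simp [pv_xor, hv]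
          rw [h1, ih 1 (by omega)]
          congr 1
          simp [hv]
          omega
        · have h1 : pv_xor ((1 : Nat) : Int) v = ((0 : Nat) : Int) := by simp [pv_xor, hv]
          rw [h1, ih 0 (by omega)]
          congr 1
          simp [hv]
          omega
      · have h1 : pv_xor ((i : Nat) : Int) v = ((i : Nat) : Int) := by
          interval_cases i <;> simp [pv_xor, hv]
        rw [h1, ih i hi]
        congr 1
        simp [hv]

theorem scalar_eq_parity (a b : List Int) :
    pv_scalar_mult_mod_2 a b
      = ((((a.zip b).countP (fun p => decide (p.1 * p.2 ≠ 0))) % 2 : Nat) : Int) := by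
  unfold pv_scalar_mult_mod_2 pv_xor_array
  conv_lhs => rw [show (0 : Int) = ((0 : Nat) : Int) from rfl]
  rw [xorfold_eq _ 0 (by omega), List.countP_map]
  simp only [Nat.zero_add]
  rfl

-- the value B computes for one pair equals the value A computes
theorem value_eq (a b : List Int) :
    PySem.Int.band ((PySem.Int.bitCount (PySem.Int.band (pv_mask a) (pv_mask b)) : Nat) : Int) 1
      = pv_scalar_mult_mod_2 a b := by
  rw [pv_mask_eq, pv_mask_eq, PySem.Int.band_natCast, popcount_land_eq a b, scalar_eq_parity a b,
    PySem.Int.band_one]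
  exact_mod_cast PySem.Int.mod_natCast _ 2

-- fold congruence: B's inner loop over precomputed (tuple, mask) pairs builds the same dict
theorem inner_fold_eq (a : List Int) (ub : List (List Int)) :
    ∀ d : PySem.Dict (List Int × List Int) Int,
      ub.foldl (fun d un_b => d.insert (a, un_b) (pv_scalar_mult_mod_2 a un_b)) d
        = (ub.map (fun t => (t, pv_mask t))).foldl
            (fun d r => d.insert (a, r.1)
              (PySem.Int.band ((PySem.Int.bitCount (PySem.Int.band (pv_mask a) r.2) : Nat) : Int) 1)) d := by
  induction ub with
  | nil => intro d; rfl
  | cons y ys ih =>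
      intro d
      simp only [List.map_cons, List.foldl_cons, value_eq a y]
      exact ih _

theorem outer_fold_eq (ua ub : List (List Int)) :
    ∀ d : PySem.Dict (List Int × List Int) Int,
      ua.foldl (fun d un_a =>
          ub.foldl (fun d un_b => d.insert (un_a, un_b) (pv_scalar_mult_mod_2 un_a un_b)) d) d
        = (ua.map (fun t => (t, pv_mask t))).foldl (fun d q =>
            (ub.map (fun t => (t, pv_mask t))).foldl
              (fun d r => d.insert (q.1, r.1)
                (PySem.Int.band ((PySem.Int.bitCount (PySem.Int.band q.2 r.2) : Nat) : Int) 1)) d) d := by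
  induction ua with
  | nil => intro d; rfl
  | cons x xs ih =>
      intro d
      simp only [List.map_cons, List.foldl_cons]
      rw [← inner_fold_eq x ub d]
      exact ih _

-- ===== VERDICT (by name: the statement is the Claim_ definition above) =====
theorem make_count_matrix_spec : Claim_equal_make_count_matrix := by
  intro ma mb _
  unfold Spec_make_count_matrix make_count_matrix make_count_matrix_alt
  simp only [outer_fold_eq]
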